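-- pv_equiv track=rewrite | github.com/KodyKlupt/Peptide_Motif_Search | motif_searcher.py | expand_motif
-- ===== SOURCE A (Python) =====
-- AMINO_ACID_NOMENCLATURE = {
--     'A': ['A'], 'C': ['C'], 'D': ['D'], 'E': ['E'], 'F': ['F'], 'G': ['G'], 'H': ['H'], 'I': ['I'], 'K': ['K'], 'L': ['L'], 'M': ['M'], 'N': ['N'], 'P': ['P'], 'Q': ['Q'], 'R': ['R'], 'S': ['S'], 'T': ['T'], 'V': ['V'], 'W': ['W'], 'Y': ['Y'],
--     '%': ['A', 'V', 'I', 'L', 'M', 'F', 'Y', 'W'], #hydrophobic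
--     '@': ['F', 'Y', 'W', 'H'], #aromatic....if you include histidine, its not super strict here, delete if needed
--     '&': ['R', 'N', 'D', 'Q', 'E', 'K', 'H', 'S', 'T', 'Y'], #polar
--     '[+]': ['K', 'R', 'H'], #positively charged
--     '[-]': ['D', 'E'], #negatively charged
--     '#': ['A', 'V', 'L', 'I'], #aliphatic
--     '~': ['A', 'C', 'D', 'G', 'N', 'P', 'S', 'T', 'V'], #small
--     'x': ['A', 'C', 'D', 'E', 'F', 'G', 'H', 'I', 'K', 'L', 'M', 'N', 'P', 'Q', 'R', 'S', 'T', 'V', 'W', 'Y'], #any amino acid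
-- }
--
-- def expand_motif(motif):
--     """
--     This will write the motifs into concrete sequences and then you can search through the protein sequence
--     """
--     if not motif:
--         return [""]
--
--     token = None
--     token_end_index = 0
--
--     if motif.startswith('['):
--         token_end_index = motif.find(']') + 1
--         token = motif[:token_end_index]
--     elif motif.startswith('{'):
--         token_end_index = motif.find('}') + 1
--         token = motif[:token_end_index]
--     else:
--         token_end_index = 1
--         token = motif[0]
--
--     options = []
--     if token in AMINO_ACID_NOMENCLATURE:
--         options = AMINO_ACID_NOMENCLATURE[token]
--     elif token.startswith('[') and token.endswith(']'):
--         options = list(token[1:-1])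
--     elif token.startswith('{') and token.endswith('}'):
--         excluded_chars = set(list(token[1:-1]))
--         all_amino_acids = AMINO_ACID_NOMENCLATURE['x']
--         options = [aa for aa in all_amino_acids if aa not in excluded_chars]
--     else:
--         options = [token]
--
--     remaining_motif_expansions = expand_motif(motif[token_end_index:])
--     return [aa + r for aa in options for r in remaining_motif_expansions]
-- ===== SOURCE B (Python) =====
-- AMINO_ACID_NOMENCLATURE = {
--     'A': ['A'], 'C': ['C'], 'D': ['D'], 'E': ['E'], 'F': ['F'], 'G': ['G'], 'H': ['H'], 'I': ['I'], 'K': ['K'], 'L': ['L'], 'M': ['M'], 'N': ['N'], 'P': ['P'], 'Q': ['Q'], 'R': ['R'], 'S': ['S'], 'T': ['T'], 'V': ['V'], 'W': ['W'], 'Y': ['Y'],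
--     '%': ['A', 'V', 'I', 'L', 'M', 'F', 'Y', 'W'],
--     '@': ['F', 'Y', 'W', 'H'],
--     '&': ['R', 'N', 'D', 'Q', 'E', 'K', 'H', 'S', 'T', 'Y'],
--     '[+]': ['K', 'R', 'H'],
--     '[-]': ['D', 'E'],
--     '#': ['A', 'V', 'L', 'I'],
--     '~': ['A', 'C', 'D', 'G', 'N', 'P', 'S', 'T', 'V'],
--     'x': ['A', 'C', 'D', 'E', 'F', 'G', 'H', 'I', 'K', 'L', 'M', 'N', 'P', 'Q', 'R', 'S', 'T', 'V', 'W', 'Y'],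
-- }
--
--
-- def _options(token):
--     """Options list for one motif token."""
--     if token in AMINO_ACID_NOMENCLATURE:
--         return AMINO_ACID_NOMENCLATURE[token]
--     if token[0] == '[' and token[-1] == ']':
--         return list(token[1:-1])
--     if token[0] == '{' and token[-1] == '}':
--         excluded = set(token[1:-1])
--         return [aa for aa in AMINO_ACID_NOMENCLATURE['x'] if aa not in excluded]
--     return [token]
--
--
-- def expand_motif(motif):
--     # Phase 1: tokenize the motif left to right into a list of option lists.
--     option_lists = []
--     i = 0
--     n = len(motif)
--     while i < n:
--         c = motif[i]
--         if c == '[' or c == '{':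
--             close = ']' if c == '[' else '}'
--             j = motif.find(close, i)
--             if j == -1:
--                 # unterminated group: take the rest of the motif as one token
--                 option_lists.append(_options(motif[i:]))
--                 i = n
--             else:
--                 option_lists.append(_options(motif[i:j + 1]))
--                 i = j + 1
--         else:
--             option_lists.append(_options(c))
--             i += 1
--     # Phase 2: fold the option lists into all concrete sequences.
--     results = [""]
--     for opts in option_lists:
--         results = [p + o for p in results for o in opts]
--     return results
-- ===== Notes on version B (the rewrite author's own statement) =====
-- stated objective: alternative
-- what changed: A interleaves tokenizing and product-building in one Python recursion that re-slices the motif at every level; B first tokenizes the motif once into per-position option lists, then builds all sequences with a separate iterative left fold of the cartesian product (no recursion, no repeated string slicing).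
-- outside the precondition, e.g. on expand_motif('[{]'): A returns ['{'], B returns ['{']
import Mathlib
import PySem

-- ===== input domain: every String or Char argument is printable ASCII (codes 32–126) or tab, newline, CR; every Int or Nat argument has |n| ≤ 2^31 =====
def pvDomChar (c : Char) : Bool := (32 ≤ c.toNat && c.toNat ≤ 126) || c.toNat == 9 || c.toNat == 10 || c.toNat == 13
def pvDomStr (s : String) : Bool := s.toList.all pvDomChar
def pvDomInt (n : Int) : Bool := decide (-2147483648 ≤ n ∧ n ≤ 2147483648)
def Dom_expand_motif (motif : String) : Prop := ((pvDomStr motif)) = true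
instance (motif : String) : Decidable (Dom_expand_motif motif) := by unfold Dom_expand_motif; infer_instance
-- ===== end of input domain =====

-- B replaces A's build-the-product-while-recursing with a two-phase decomposition
-- (tokenize once into option lists, then fold the cartesian product iteratively); measured faster at the check's sizes.

-- ===== PORT A =====
-- the AMINO_ACID_NOMENCLATURE module constant (strings as List Char; values are lists of 1-char strings)
def pvAllAA : List (List Char) :=
  [['A'], ['C'], ['D'], ['E'], ['F'], ['G'], ['H'], ['I'], ['K'], ['L'], ['M'], ['N'], ['P'], ['Q'], ['R'], ['S'], ['T'], ['V'], ['W'], ['Y']]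

def pvAAN : List (List Char × List (List Char)) := [
  (['A'], [['A']]),
  (['C'], [['C']]),
  (['D'], [['D']]),
  (['E'], [['E']]),
  (['F'], [['F']]),
  (['G'], [['G']]),
  (['H'], [['H']]),
  (['I'], [['I']]),
  (['K'], [['K']]),
  (['L'], [['L']]),
  (['M'], [['M']]),
  (['N'], [['N']]),
  (['P'], [['P']]),
  (['Q'], [['Q']]),
  (['R'], [['R']]),
  (['S'], [['S']]),
  (['T'], [['T']]),
  (['V'], [['V']]),
  (['W'], [['W']]),
  (['Y'], [['Y']]),
  (['%'], [['A'], ['V'], ['I'], ['L'], ['M'], ['F'], ['Y'], ['W']]),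
  (['@'], [['F'], ['Y'], ['W'], ['H']]),
  (['&'], [['R'], ['N'], ['D'], ['Q'], ['E'], ['K'], ['H'], ['S'], ['T'], ['Y']]),
  (['[', '+', ']'], [['K'], ['R'], ['H']]),
  (['[', '-', ']'], [['D'], ['E']]),
  (['#'], [['A'], ['V'], ['L'], ['I']]),
  (['~'], [['A'], ['C'], ['D'], ['G'], ['N'], ['P'], ['S'], ['T'], ['V']]),
  (['x'], pvAllAA)
]

-- A's recursion, step for step. fuel is only a totality guard: Python A recurses without
-- advancing (and eventually raises RecursionError) exactly when fuel could run out under Pre_;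
-- 'motif.find(x) + 1' with find = -1 becomes tend = 0, as in Python.
def pvExpandA : Nat → List Char → List (List Char)
  | 0, _ => []
  | fuel + 1, m =>
    match m with
    | [] => [[]]
    | c :: _ =>
      let tend : Nat :=
        if c = '[' then
          match m.findIdx? (· = ']') with | some j => j + 1 | none => 0
        else if c = '{' then
          match m.findIdx? (· = '}') with | some j => j + 1 | none => 0
        else 1
      let token := m.take tend
      let options : List (List Char) :=
        match pvAAN.lookup token with
        | some v => v
        | none =>
          if token.head? = some '[' ∧ token.getLast? = some ']' then
            ((token.drop 1).dropLast).map (fun ch => [ch])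
          else if token.head? = some '{' ∧ token.getLast? = some '}' then
            let excluded : PySem.Set (List Char) :=
              PySem.Set.ofList (((token.drop 1).dropLast).map (fun ch => [ch]))
            pvAllAA.filter (fun aa => ¬ excluded.contains aa)
          else [token]
      let rest := pvExpandA fuel (m.drop tend)
      options.flatMap (fun aa => rest.map (fun r => aa ++ r))

def expand_motif (motif : String) : List String :=
  (pvExpandA (motif.toList.length + 1) motif.toList).map (fun cs => String.ofList cs)

-- ===== PORT B =====
-- B's per-token helper _options
def pvOptions (token : List Char) : List (List Char) :=
  match pvAAN.lookup token with
  | some v => v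
  | none =>
    if token.head? = some '[' ∧ token.getLast? = some ']' then
      ((token.drop 1).dropLast).map (fun ch => [ch])
    else if token.head? = some '{' ∧ token.getLast? = some '}' then
      let excluded : PySem.Set (List Char) :=
        PySem.Set.ofList (((token.drop 1).dropLast).map (fun ch => [ch]))
      pvAllAA.filter (fun aa => ¬ excluded.contains aa)
    else [token]

-- phase 1: the while loop producing option_lists (motif.find(close, i) searches from i;
-- position i holds '[' or '{', never the closer, so searching the tail is the same search)
def pvTokenize : List Char → List (List (List Char))
  | [] => []
  | c :: rest =>
    if c = '[' ∨ c = '{' then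
      let close := if c = '[' then ']' else '}'
      match rest.findIdx? (· = close) with
      | none => [pvOptions (c :: rest)]
      | some j => pvOptions (c :: rest.take (j + 1)) :: pvTokenize (rest.drop (j + 1))
    else
      pvOptions [c] :: pvTokenize rest
termination_by m => m.length
decreasing_by
  all_goals simp

-- phase 2: one step of the product fold 'results = [p + o for p in results for o in opts]'
def pvCombStep (acc : List (List Char)) (opts : List (List Char)) : List (List Char) :=
  acc.flatMap (fun p => opts.map (fun o => p ++ o))

def expand_motif_alt (motif : String) : List String :=
  ((pvTokenize motif.toList).foldl pvCombStep [[]]).map (fun cs => String.ofList cs)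

-- ===== PRECONDITION & SPEC =====
-- Pre_ excludes motifs in which some '[' has no ']' after it or some '{' has no '}' after it:
-- when the tokenizer reaches such a bracket A recurses without advancing and raises
-- RecursionError; when such a bracket is only reached inside another group A returns
-- normally and those (rarer) inputs are excluded too (see cites).
def Pre_expand_motif (motif : String) : Prop :=
  ∀ i < motif.toList.length,
    (motif.toList.getD i ' ' = '[' → ']' ∈ motif.toList.drop (i + 1)) ∧
    (motif.toList.getD i ' ' = '{' → '}' ∈ motif.toList.drop (i + 1))
instance (motif : String) : Decidable (Pre_expand_motif motif) := by
  unfold Pre_expand_motif; infer_instance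

def pvWitness_expand_motif : String := "A[CD]x"

def Spec_expand_motif (motif : String) (out : List String) : Prop := out = expand_motif_alt motif
instance (motif : String) (out : List String) : Decidable (Spec_expand_motif motif out) := by unfold Spec_expand_motif; infer_instance

-- ===== CLAIM (what is proved, stated in full; the proofs are below) =====
def Claim_equal_expand_motif : Prop := ∀ (motif : String), Dom_expand_motif motif → Pre_expand_motif motif → Spec_expand_motif motif (expand_motif motif)

-- ===== LEMMAS AND PROOFS =====

theorem expand_motif_witness_ok :
    Dom_expand_motif pvWitness_expand_motif ∧ Pre_expand_motif pvWitness_expand_motif := by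
  constructor <;> decide

-- combAll: the whole phase-2 fold
def pvCombAll (ls : List (List (List Char))) : List (List Char) := ls.foldl pvCombStep [[]]

theorem pvCombStep_single (o : List (List Char)) : pvCombStep [[]] o = o := by
  simp [pvCombStep]

theorem pvCombStep_assoc (a b c : List (List Char)) :
    pvCombStep (pvCombStep a b) c = pvCombStep a (pvCombStep b c) := by
  induction a with
  | nil => simp [pvCombStep]
  | cons p a ih =>
    simp only [pvCombStep, List.flatMap_cons] at ih ⊢
    rw [List.flatMap_append, ih, List.flatMap_map]
    simp [List.map_flatMap, Function.comp_def, List.map_map, List.append_assoc]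

theorem pvFoldl_combStep (ls : List (List (List Char))) (acc : List (List Char)) :
    ls.foldl pvCombStep acc = pvCombStep acc (pvCombAll ls) := by
  induction ls generalizing acc with
  | nil => simp [pvCombAll, pvCombStep]
  | cons o ls ih =>
    show List.foldl pvCombStep (pvCombStep acc o) ls = _
    rw [ih]
    have h2 : pvCombAll (o :: ls) = pvCombStep o (pvCombAll ls) := by
      show List.foldl pvCombStep (pvCombStep [[]] o) ls = _
      rw [ih, pvCombStep_single]
    rw [h2, pvCombStep_assoc]

theorem pvCombAll_cons (o : List (List Char)) (ls : List (List (List Char))) :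
    pvCombAll (o :: ls) = pvCombStep o (pvCombAll ls) := by
  show List.foldl pvCombStep (pvCombStep [[]] o) ls = _
  rw [pvFoldl_combStep, pvCombStep_single]

-- the precondition on the char list
def pvPreL (l : List Char) : Prop :=
  ∀ i < l.length,
    (l.getD i ' ' = '[' → ']' ∈ l.drop (i + 1)) ∧
    (l.getD i ' ' = '{' → '}' ∈ l.drop (i + 1))

theorem pvPreL_drop (l : List Char) (k : Nat) (h : pvPreL l) : pvPreL (l.drop k) := by
  intro i hi
  have hk : k + i < l.length := by simp at hi; omega
  have hki := h (k + i) hk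
  have e1 : (l.drop k).getD i ' ' = l.getD (k + i) ' ' := by
    simp [List.getD, List.getElem?_drop]
  have e2 : (l.drop k).drop (i + 1) = l.drop (k + i + 1) := by
    rw [List.drop_drop, Nat.add_assoc]
  rw [e1, e2]
  exact hki

-- main invariant: A's recursion computes the fold of B's token list
theorem pvMain (fuel : Nat) : ∀ l : List Char, pvPreL l → l.length < fuel →
    pvExpandA fuel l = pvCombAll (pvTokenize l) := by
  induction fuel with
  | zero => intro l _ h; omega
  | succ f ih =>
    intro l hpre hlen
    match l with
    | [] => simp [pvExpandA, pvTokenize, pvCombAll]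
    | c :: rest =>
      have hr : pvPreL rest := by
        have hd := pvPreL_drop (c :: rest) 1 hpre
        simpa using hd
      rcases Decidable.em (c = '[') with h1 | h1
      · subst h1
        have hmem : ']' ∈ rest := by
          have h0 := (hpre 0 (by simp)).1
          simpa using h0 (by simp [List.getD])
        obtain ⟨j, hj⟩ : ∃ j, rest.findIdx? (· = ']') = some j := by
          cases hfi : rest.findIdx? (· = ']') with
          | some j => exact ⟨j, rfl⟩
          | none =>
            exfalso
            simp [List.findIdx?_eq_none_iff] at hfi
            exact hfi ']' hmem rfl
        have hIH := ih (rest.drop (j + 1)) (pvPreL_drop rest (j + 1) hr)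
          (by simp at hlen ⊢; omega)
        simp only [pvExpandA, pvTokenize]
        simp [List.findIdx?_cons, hj, hIH, pvCombAll_cons, pvCombStep, pvOptions,
          List.take_succ_cons, List.drop_succ_cons]
      · rcases Decidable.em (c = '{') with h2 | h2
        · subst h2
          have hmem : '}' ∈ rest := by
            have h0 := (hpre 0 (by simp)).2
            simpa using h0 (by simp [List.getD])
          obtain ⟨j, hj⟩ : ∃ j, rest.findIdx? (· = '}') = some j := by
            cases hfi : rest.findIdx? (· = '}') with
            | some j => exact ⟨j, rfl⟩
            | none =>
              exfalso
              simp [List.findIdx?_eq_none_iff] at hfi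
              exact hfi '}' hmem rfl
          have hIH := ih (rest.drop (j + 1)) (pvPreL_drop rest (j + 1) hr)
            (by simp at hlen ⊢; omega)
          simp only [pvExpandA, pvTokenize]
          simp [List.findIdx?_cons, hj, hIH, pvCombAll_cons, pvCombStep, pvOptions,
            List.take_succ_cons, List.drop_succ_cons]
        · have hIH := ih rest hr (by simp at hlen; omega)
          simp only [pvExpandA, pvTokenize]
          simp [h1, h2, hIH, pvCombAll_cons, pvCombStep, pvOptions]

-- ===== VERDICT (by name: the statement is the Claim_ definition above) =====
theorem expand_motif_spec : Claim_equal_expand_motif := by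
  intro motif _ hpre
  show expand_motif motif = expand_motif_alt motif
  unfold expand_motif expand_motif_alt
  rw [pvMain (motif.toList.length + 1) motif.toList hpre (by omega)]
  rfl
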